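-- pv_equiv track=rewrite | github.com/LwPol/advent_of_code_2024 | day_22.py | generate_price_changes
-- ===== SOURCE A (Python) =====
-- def derive_new_secret(current: int) -> int:
--     current ^= 64 * current
--     current %= 16777216
--     current ^= current // 32
--     current %= 16777216
--     current ^= 2048 * current
--     current %= 16777216
--     return current
--
-- def get_price(secret: int) -> int:
--     return secret % 10
--
-- def generate_price_changes(secret: int, total_sells: int):
--     diffs = []
--     prices = []
--     for _ in range(total_sells):
--         new_secret = derive_new_secret(secret)
--         current_price = get_price(new_secret)
--         diffs.append(current_price - get_price(secret))
--         prices.append(current_price)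
--         secret = new_secret
--     return zip(diffs, diffs[1:], diffs[2:], diffs[3:], prices[3:])
-- ===== SOURCE B (Python) =====
-- def derive_new_secret(current: int) -> int:
--     current ^= 64 * current
--     current %= 16777216
--     current ^= current // 32
--     current %= 16777216
--     current ^= 2048 * current
--     current %= 16777216
--     return current
--
-- def get_price(secret: int) -> int:
--     return secret % 10
--
-- def generate_price_changes(secret: int, total_sells: int):
--     # single fused pass: rolling 3-diff buffer, emit each window as soon as it is complete
--     result = []
--     buf = []
--     for _ in range(total_sells):
--         new_secret = derive_new_secret(secret)
--         price = get_price(new_secret)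
--         d = price - get_price(secret)
--         match buf:
--             case [b1, b2, b3]:
--                 result.append((b1, b2, b3, d, price))
--                 buf = [b2, b3, d]
--             case _:
--                 buf.append(d)
--         secret = new_secret
--     return result
-- ===== Notes on version B (the rewrite author's own statement) =====
-- stated objective: alternative
-- what changed: Instead of building full diffs/prices lists and zipping four offset slices, B makes one fused pass that keeps a rolling buffer of the last three diffs and emits each 5-tuple as soon as its window completes (A returns a lazy zip iterator, B the list of the identical tuples).
import Mathlib
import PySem

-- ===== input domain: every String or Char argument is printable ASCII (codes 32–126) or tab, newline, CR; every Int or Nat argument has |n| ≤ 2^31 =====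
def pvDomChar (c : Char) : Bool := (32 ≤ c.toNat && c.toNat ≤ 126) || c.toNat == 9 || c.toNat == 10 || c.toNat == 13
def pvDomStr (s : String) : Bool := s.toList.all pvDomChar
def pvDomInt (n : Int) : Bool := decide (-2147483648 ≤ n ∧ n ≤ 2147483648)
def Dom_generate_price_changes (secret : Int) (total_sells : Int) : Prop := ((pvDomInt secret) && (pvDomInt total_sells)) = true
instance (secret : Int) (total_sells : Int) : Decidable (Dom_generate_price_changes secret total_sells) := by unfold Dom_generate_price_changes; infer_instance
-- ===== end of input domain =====

-- B fuses A's build-two-lists-then-zip-slices into one pass with a rolling 3-diff buffer,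
-- emitting each window tuple as soon as it is complete (alternative decomposition, same cost;
-- A returns a lazy zip iterator, B the list of the identical tuples).


-- ===== PORT A =====
def derive_new_secret (current : Int) : Int :=
  let current := PySem.Int.bxor current (64 * current)
  let current := PySem.Int.mod current 16777216
  let current := PySem.Int.bxor current (PySem.Int.floordiv current 32)
  let current := PySem.Int.mod current 16777216
  let current := PySem.Int.bxor current (2048 * current)
  let current := PySem.Int.mod current 16777216
  current

def get_price (secret : Int) : Int := PySem.Int.mod secret 10

def generate_price_changes (secret : Int) (total_sells : Int) : List (Int × Int × Int × Int × Int) :=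
  let st := (PySem.List.pyRange 0 total_sells 1).foldl
    (fun (st : List Int × List Int × Int) _ =>
      let (diffs, prices, secret) := st
      let new_secret := derive_new_secret secret
      let current_price := get_price new_secret
      (diffs ++ [current_price - get_price secret], prices ++ [current_price], new_secret))
    ([], [], secret)
  let diffs := st.1
  let prices := st.2.1
  diffs.zip ((PySem.List.slice diffs (some 1) none).zip
    ((PySem.List.slice diffs (some 2) none).zip
      ((PySem.List.slice diffs (some 3) none).zip
        (PySem.List.slice prices (some 3) none))))

-- ===== PORT B =====
def generate_price_changes_alt (secret : Int) (total_sells : Int) : List (Int × Int × Int × Int × Int) :=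
  let st := (PySem.List.pyRange 0 total_sells 1).foldl
    (fun (st : List (Int × Int × Int × Int × Int) × List Int × Int) _ =>
      let (result, buf, secret) := st
      let new_secret := derive_new_secret secret
      let price := get_price new_secret
      let d := price - get_price secret
      match buf with
      | [b1, b2, b3] => (result ++ [(b1, b2, b3, d, price)], [b2, b3, d], new_secret)
      | _ => (result, buf ++ [d], new_secret))
    ([], [], secret)
  st.1

-- ===== PRECONDITION & SPEC =====
def Spec_generate_price_changes (secret : Int) (total_sells : Int) (out : List (Int × Int × Int × Int × Int)) : Prop := out = generate_price_changes_alt secret total_sells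
instance (secret : Int) (total_sells : Int) (out : List (Int × Int × Int × Int × Int)) : Decidable (Spec_generate_price_changes secret total_sells out) := by unfold Spec_generate_price_changes; infer_instance

-- ===== CLAIM (what is proved, stated in full; the proofs are below) =====
def Claim_equal_generate_price_changes : Prop := ∀ (secret : Int) (total_sells : Int), Dom_generate_price_changes secret total_sells → Spec_generate_price_changes secret total_sells (generate_price_changes secret total_sells)

-- ===== LEMMAS AND PROOFS =====

-- the diff/price streams of the first n derived secrets
def diffsN (secret : Int) (n : Nat) : List Int :=
  match n with
  | 0 => []
  | Nat.succ m => (get_price (derive_new_secret secret) - get_price secret) :: diffsN (derive_new_secret secret) m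

def pricesN (secret : Int) (n : Nat) : List Int :=
  match n with
  | 0 => []
  | Nat.succ m => get_price (derive_new_secret secret) :: pricesN (derive_new_secret secret) m

def zip5 (a b c d e : List Int) : List (Int × Int × Int × Int × Int) :=
  a.zip (b.zip (c.zip (d.zip e)))

-- a fold whose function ignores the element is an iterate of the step
theorem foldl_ignore {α β : Type} (g : β → β) :
    ∀ (l : List α) (init : β), l.foldl (fun s _ => g s) init = g^[l.length] init := by
  intro l
  induction l with
  | nil => intro init; rfl
  | cons x xs ih =>
      intro init
      simp [List.foldl_cons, ih, Function.iterate_succ_apply]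

def stepA (st : List Int × List Int × Int) : List Int × List Int × Int :=
  let (diffs, prices, secret) := st
  let new_secret := derive_new_secret secret
  let current_price := get_price new_secret
  (diffs ++ [current_price - get_price secret], prices ++ [current_price], new_secret)

def stepB (st : List (Int × Int × Int × Int × Int) × List Int × Int) :
    List (Int × Int × Int × Int × Int) × List Int × Int :=
  let (result, buf, secret) := st
  let new_secret := derive_new_secret secret
  let price := get_price new_secret
  let d := price - get_price secret
  match buf with
  | [b1, b2, b3] => (result ++ [(b1, b2, b3, d, price)], [b2, b3, d], new_secret)
  | _ => (result, buf ++ [d], new_secret)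

def iterSec (secret : Int) (n : Nat) : Int :=
  match n with
  | 0 => secret
  | Nat.succ m => iterSec (derive_new_secret secret) m

theorem iterA (n : Nat) : ∀ (D P : List Int) (secret : Int),
    stepA^[n] (D, P, secret) = (D ++ diffsN secret n, P ++ pricesN secret n, iterSec secret n) := by
  induction n with
  | zero => intro D P secret; simp [diffsN, pricesN, iterSec]
  | succ m ih =>
      intro D P secret
      rw [Function.iterate_succ_apply]
      show stepA^[m] (stepA (D, P, secret)) = _
      simp only [stepA, ih, diffsN, pricesN, iterSec, List.append_assoc, List.singleton_append]

theorem iterB (n : Nat) : ∀ (R : List (Int × Int × Int × Int × Int)) (buf : List Int) (secret : Int),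
    buf.length ≤ 3 →
    (stepB^[n] (R, buf, secret)).1 =
      R ++ zip5 (buf ++ diffsN secret n)
                ((buf ++ diffsN secret n).drop 1)
                ((buf ++ diffsN secret n).drop 2)
                ((buf ++ diffsN secret n).drop 3)
                ((pricesN secret n).drop (3 - buf.length)) := by
  induction n with
  | zero =>
      intro R buf secret hb
      rcases buf with _ | ⟨a, _ | ⟨b, _ | ⟨c, _ | ⟨d, tl⟩⟩⟩⟩ <;>
        simp_all [diffsN, pricesN, zip5]
  | succ m ih =>
      intro R buf secret hb
      rw [Function.iterate_succ_apply]
      rcases buf with _ | ⟨a, _ | ⟨b, _ | ⟨c, _ | ⟨d, tl⟩⟩⟩⟩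
      · show (stepB^[m] (R, [_], derive_new_secret secret)).1 = _
        rw [ih R [_] (derive_new_secret secret) (by simp)]
        simp [diffsN, pricesN, zip5]
      · show (stepB^[m] (R, [a, _], derive_new_secret secret)).1 = _
        rw [ih R [a, _] (derive_new_secret secret) (by simp)]
        simp [diffsN, pricesN, zip5]
      · show (stepB^[m] (R, [a, b, _], derive_new_secret secret)).1 = _
        rw [ih R [a, b, _] (derive_new_secret secret) (by simp)]
        simp [diffsN, pricesN, zip5]
      · show (stepB^[m] (R ++ [(a, b, c, _, _)], [b, c, _], derive_new_secret secret)).1 = _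
        rw [ih (R ++ [(a, b, c, _, _)]) [b, c, _] (derive_new_secret secret) (by simp)]
        simp [diffsN, pricesN, zip5, List.append_assoc]
      · exfalso; simp at hb; omega

-- ===== VERDICT (by name: the statement is the Claim_ definition above) =====
theorem generate_price_changes_spec : Claim_equal_generate_price_changes := by
  intro secret total_sells _
  unfold Spec_generate_price_changes generate_price_changes generate_price_changes_alt
  rw [show (fun (st : List Int × List Int × Int) (_ : Int) =>
      let (diffs, prices, secret) := st
      let new_secret := derive_new_secret secret
      let current_price := get_price new_secret
      (diffs ++ [current_price - get_price secret], prices ++ [current_price], new_secret))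
      = (fun st _ => stepA st) from rfl]
  rw [show (fun (st : List (Int × Int × Int × Int × Int) × List Int × Int) (_ : Int) =>
      let (result, buf, secret) := st
      let new_secret := derive_new_secret secret
      let price := get_price new_secret
      let d := price - get_price secret
      match buf with
      | [b1, b2, b3] => (result ++ [(b1, b2, b3, d, price)], [b2, b3, d], new_secret)
      | _ => (result, buf ++ [d], new_secret))
      = (fun st _ => stepB st) from rfl]
  rw [foldl_ignore stepA, foldl_ignore stepB, iterA, iterB _ _ _ _ (by simp)]
  simp [zip5, PySem.List.slice_from]
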